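-- pv_equiv track=rewrite | github.com/sgraghav/GRACE-Mission | Filtered_cofficients.py | upper2full
-- ===== SOURCE A (Python) =====
-- def upper2full(mat):
--     other_half=[]
--     new_mat=[]
--     for i in range(len(mat)):
--         for j in range(i):
--             other_half.append(mat[j][i-j])
--         new_mat.append(other_half+mat[i])
--         other_half=[]
--     return new_mat
-- ===== SOURCE B (Python) =====
-- def upper2full(mat):
--     return [[mat[min(i, j)][abs(i - j)] for j in range(i + len(mat[i]))]
--             for i in range(len(mat))]
-- ===== Notes on version B (the rewrite author's own statement) =====
-- stated objective: idiomatic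
-- what changed: Each full row is built by one uniform per-cell symmetric-index formula mat[min(i,j)][abs(i-j)] over j in range(i+len(mat[i])), replacing A's two-part scheme of scanning earlier rows' columns into other_half and concatenating the stored slice.
import Mathlib
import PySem

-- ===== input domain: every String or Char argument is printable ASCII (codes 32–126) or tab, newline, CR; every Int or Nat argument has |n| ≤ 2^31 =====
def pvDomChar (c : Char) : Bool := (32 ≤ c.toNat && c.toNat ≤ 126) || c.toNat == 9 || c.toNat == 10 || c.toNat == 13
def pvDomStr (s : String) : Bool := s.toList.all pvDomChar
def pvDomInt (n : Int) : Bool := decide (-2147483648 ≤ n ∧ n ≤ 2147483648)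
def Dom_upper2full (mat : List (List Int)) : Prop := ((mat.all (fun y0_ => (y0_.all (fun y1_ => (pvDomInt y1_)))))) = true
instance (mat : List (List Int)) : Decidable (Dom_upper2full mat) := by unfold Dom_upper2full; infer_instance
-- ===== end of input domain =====

-- B replaces A's two-part row construction (scan of earlier rows' columns + stored slice)
-- with one uniform per-cell symmetric index formula full[i][j] = mat[min i j][|i-j|] (objective: idiomatic).

-- ===== PORT A =====
-- transliteration of A: outer loop appends other_half + mat[i]; inner loop appends mat[j][i-j].
-- Indices are nonnegative Nats; out-of-range access (Python IndexError) is excluded by Pre_,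
-- so List.getD is exact on the admitted inputs.
def upper2full (mat : List (List Int)) : List (List Int) :=
  (List.range mat.length).foldl
    (fun new_mat i =>
      let other_half :=
        (List.range i).foldl (fun oh j => oh ++ [(mat.getD j []).getD (i - j) 0]) []
      new_mat ++ [other_half ++ mat.getD i []])
    []

-- ===== PORT B =====
def upper2full_alt (mat : List (List Int)) : List (List Int) :=
  (List.range mat.length).map (fun i =>
    (List.range (i + (mat.getD i []).length)).map (fun j =>
      (mat.getD (min i j) []).getD (max i j - min i j) 0))

-- ===== PRECONDITION & SPEC =====
-- Pre_ excludes exactly the inputs on which Python A raises IndexError: a stored row j that is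
-- too short to supply column i-j for some later row i.
def Pre_upper2full (mat : List (List Int)) : Prop :=
  ∀ j < mat.length, j + 1 < mat.length → mat.length ≤ (mat.getD j []).length + j
instance (mat : List (List Int)) : Decidable (Pre_upper2full mat) := by
  unfold Pre_upper2full; infer_instance
def pvWitness_upper2full : List (List Int) := [[1, 2, 3], [4, 5], [6]]

def Spec_upper2full (mat : List (List Int)) (out : List (List Int)) : Prop := out = upper2full_alt mat
instance (mat : List (List Int)) (out : List (List Int)) : Decidable (Spec_upper2full mat out) := by unfold Spec_upper2full; infer_instance

-- ===== CLAIM (what is proved, stated in full; the proofs are below) =====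
def Claim_equal_upper2full : Prop := ∀ (mat : List (List Int)), Dom_upper2full mat → Pre_upper2full mat → Spec_upper2full mat (upper2full mat)

-- ===== LEMMAS AND PROOFS =====

-- a foldl that only snocs is a map
theorem foldl_snoc_map {α β : Type} (f : β → α) :
    ∀ (l : List β) (acc : List α),
      l.foldl (fun a i => a ++ [f i]) acc = acc ++ l.map f := by
  intro l
  induction l with
  | nil => simp
  | cons x xs ih => intro acc; simp [List.foldl, ih]

-- reading every in-range index of a list with getD reproduces the list
theorem map_getD_range (l : List Int) :
    (List.range l.length).map (fun k => l.getD k 0) = l := by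
  apply List.ext_getElem
  · simp
  · intro i h1 h2
    simp [List.getD_eq_getElem?_getD, List.getElem?_eq_getElem h2]

theorem upper2full_spec : Claim_equal_upper2full := by
  intro mat _ _
  unfold Spec_upper2full upper2full upper2full_alt
  rw [foldl_snoc_map]
  simp only [List.nil_append]
  apply List.map_congr_left
  intro i hi
  rw [foldl_snoc_map, List.nil_append, List.range_add, List.map_append]
  congr 1
  · apply List.map_congr_left
    intro j hj
    simp only [List.mem_range] at hj
    have h1 : min i j = j := by omega
    have h2 : max i j = i := by omega
    rw [h1, h2]
  · rw [List.map_map]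
    have : ((fun j => (mat.getD (min i j) []).getD (max i j - min i j) 0) ∘ (i + ·))
        = fun k => (mat.getD i []).getD k 0 := by
      funext k
      simp only [Function.comp]
      have h1 : min i (i + k) = i := by omega
      have h2 : max i (i + k) = i + k := by omega
      rw [h1, h2]
      congr 1
      omega
    rw [this, map_getD_range]
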